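-- pv_equiv track=rewrite | github.com/EnSpec/hytools | hytools/misc/misc.py | update_topo_group
-- ===== SOURCE A (Python) =====
-- def update_topo_group(subgroup_dict_in):
--
--     subgroup_dict = {}
--     group_tag_list=[]
--
--     for file_name in subgroup_dict_in.keys():
--         group_tag = subgroup_dict_in[file_name]
--         if group_tag in subgroup_dict:
--             subgroup_dict[group_tag]+=[file_name]
--         else:
--             subgroup_dict[group_tag]=[file_name]
--             group_tag_list+=[group_tag]
--
--     update_name_list=[]
--     for group_tag in subgroup_dict.keys():
--         update_name_list+=[subgroup_dict[group_tag]]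
--
--     return update_name_list,group_tag_list
-- ===== SOURCE B (Python) =====
-- def update_topo_group(subgroup_dict_in):
--     # two-phase: ordered distinct tags first, then one re-scan per tag
--     group_tag_list = list(dict.fromkeys(subgroup_dict_in.values()))
--     update_name_list = [[f for f, t in subgroup_dict_in.items() if t == tag]
--                         for tag in group_tag_list]
--     return update_name_list, group_tag_list
-- ===== Notes on version B (the rewrite author's own statement) =====
-- stated objective: simpler
-- what changed: Replaces the single-pass dict-of-lists accumulation (with an explicit emission loop over the dict keys) by a two-phase shape: first dedupe the values in first-seen order, then build each group by filtering the items once per tag.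
import Mathlib
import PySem

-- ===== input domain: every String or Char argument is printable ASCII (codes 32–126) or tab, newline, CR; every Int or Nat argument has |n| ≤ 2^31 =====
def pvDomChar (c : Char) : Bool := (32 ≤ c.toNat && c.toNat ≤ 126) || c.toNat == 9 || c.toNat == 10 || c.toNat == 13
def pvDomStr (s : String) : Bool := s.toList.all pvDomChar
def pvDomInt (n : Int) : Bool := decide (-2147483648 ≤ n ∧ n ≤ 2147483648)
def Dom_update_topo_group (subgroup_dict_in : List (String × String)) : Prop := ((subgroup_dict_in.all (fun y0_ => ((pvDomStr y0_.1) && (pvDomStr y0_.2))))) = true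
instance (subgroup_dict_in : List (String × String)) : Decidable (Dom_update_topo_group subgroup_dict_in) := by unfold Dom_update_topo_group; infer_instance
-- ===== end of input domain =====

-- B replaces A's single-pass dict-of-lists accumulation by a two-phase shape (dedupe tags
-- first, then filter the items once per tag); objective: simpler, not faster.
-- Both ports read the Python dict argument as PySem.Dict.ofList of the association list.

-- ===== PORT A =====
def update_topo_group (subgroup_dict_in : List (String × String)) : List (List String) × List String :=
  let xs := (PySem.Dict.ofList subgroup_dict_in).items
  -- first loop: for file_name in keys: accumulate subgroup_dict and group_tag_list
  let st := xs.foldl (fun (st : PySem.Dict String (List String) × List String) p =>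
      if st.1.contains p.2 then (st.1.modify p.2 [] (· ++ [p.1]), st.2)
      else (st.1.insert p.2 [p.1], st.2 ++ [p.2])) (PySem.Dict.empty, [])
  -- second loop: for group_tag in subgroup_dict.keys(): emit its list
  let update_name_list := st.1.keys.foldl (fun acc tag => acc ++ [st.1.getD tag []]) []
  (update_name_list, st.2)

-- ===== PORT B =====
def update_topo_group_alt (subgroup_dict_in : List (String × String)) : List (List String) × List String :=
  let xs := (PySem.Dict.ofList subgroup_dict_in).items
  let group_tag_list := PySem.List.dedup (xs.map (·.2))          -- dict.fromkeys(values)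
  let update_name_list := group_tag_list.map
      (fun tag => (xs.filter (fun p => p.2 == tag)).map (·.1))   -- one re-scan per tag
  (update_name_list, group_tag_list)

-- ===== PRECONDITION & SPEC =====
def Spec_update_topo_group (subgroup_dict_in : List (String × String)) (out : List (List String) × List String) : Prop := out = update_topo_group_alt subgroup_dict_in
instance (subgroup_dict_in : List (String × String)) (out : List (List String) × List String) : Decidable (Spec_update_topo_group subgroup_dict_in out) := by unfold Spec_update_topo_group; infer_instance

-- ===== CLAIM (what is proved, stated in full; the proofs are below) =====
def Claim_equal_update_topo_group : Prop := ∀ (subgroup_dict_in : List (String × String)), Dom_update_topo_group subgroup_dict_in → Spec_update_topo_group subgroup_dict_in (update_topo_group subgroup_dict_in)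

-- ===== LEMMAS AND PROOFS =====

-- when the key is absent, A's insert branch is the same dict update as an append-modify
theorem pv_modify_of_not_contains (d : PySem.Dict String (List String)) (t : String)
    (f : String) (h : d.contains t = false) :
    d.insert t [f] = d.modify t [] (· ++ [f]) := by
  simp [PySem.Dict.modify, PySem.Dict.insert, PySem.Dict.getD_of_not_contains d [] h]

-- the dict component of A's first loop is the uniform modify-fold
theorem pv_loop_fst (xs : List (String × String)) :
    ∀ (d : PySem.Dict String (List String)) (tags : List String),
    (xs.foldl (fun (st : PySem.Dict String (List String) × List String) p =>
      if st.1.contains p.2 then (st.1.modify p.2 [] (· ++ [p.1]), st.2)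
      else (st.1.insert p.2 [p.1], st.2 ++ [p.2])) (d, tags)).1
      = xs.foldl (fun d p => d.modify p.2 [] (· ++ [p.1])) d := by
  induction xs with
  | nil => intro d tags; rfl
  | cons p xs ih =>
      intro d tags
      simp only [List.foldl_cons]
      by_cases h : d.contains p.2
      · simpa [h] using ih _ _
      · simp only [eq_false_of_ne_true h, Bool.false_eq_true, if_false]
        rw [ih, pv_modify_of_not_contains d p.2 p.1 (eq_false_of_ne_true h)]

-- the tag list of A's first loop tracks the dict's keys
theorem pv_loop_snd (xs : List (String × String)) :
    ∀ (d : PySem.Dict String (List String)) (tags : List String), tags = d.keys →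
    (xs.foldl (fun (st : PySem.Dict String (List String) × List String) p =>
      if st.1.contains p.2 then (st.1.modify p.2 [] (· ++ [p.1]), st.2)
      else (st.1.insert p.2 [p.1], st.2 ++ [p.2])) (d, tags)).2
      = (xs.foldl (fun (st : PySem.Dict String (List String) × List String) p =>
      if st.1.contains p.2 then (st.1.modify p.2 [] (· ++ [p.1]), st.2)
      else (st.1.insert p.2 [p.1], st.2 ++ [p.2])) (d, tags)).1.keys := by
  induction xs with
  | nil => intro d tags h; simpa using h
  | cons p xs ih =>
      intro d tags h
      simp only [List.foldl_cons]
      by_cases hc : d.contains p.2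
      · simp only [hc, if_true]
        exact ih _ _ (by rw [h, PySem.Dict.keys_modify, PySem.Dict.keys_insert_of_contains d _ hc])
      · simp only [eq_false_of_ne_true hc, Bool.false_eq_true, if_false]
        exact ih _ _ (by rw [h, PySem.Dict.keys_insert_of_not_contains d _ (eq_false_of_ne_true hc)])

-- the modify-fold's lookups are the per-tag filters of B
theorem pv_getD_fold (xs : List (String × String)) (c : String) :
    (xs.foldl (fun d p => d.modify p.2 [] (· ++ [p.1])) PySem.Dict.empty).getD c []
      = (xs.filter (fun p => p.2 == c)).map (·.1) := by
  have h := PySem.Dict.getD_foldl_modify_append (l := xs.map (fun p => (p.2, p.1)))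
      (d := (PySem.Dict.empty : PySem.Dict String (List String))) (c := c)
  rw [List.foldl_map] at h
  simpa [List.filter_map, List.map_map, Function.comp] using h

-- the modify-fold's keys are the first-seen distinct tags
theorem pv_keys_fold (xs : List (String × String)) :
    (xs.foldl (fun d p => d.modify p.2 [] (· ++ [p.1])) PySem.Dict.empty).keys
      = PySem.List.dedup (xs.map (·.2)) := by
  have h := PySem.Dict.keys_foldl_modify_key (l := xs) (key := fun p => p.2)
      (d0 := ([] : List String)) (f := fun _ p => (· ++ [p.1]))
      (d := (PySem.Dict.empty : PySem.Dict String (List String)))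
  simpa using h

-- ===== VERDICT (by name: the statement is the Claim_ definition above) =====
theorem update_topo_group_spec : Claim_equal_update_topo_group := by
  intro inp _
  unfold Spec_update_topo_group update_topo_group update_topo_group_alt
  set xs := (PySem.Dict.ofList inp).items with hxs
  have hfst := pv_loop_fst xs PySem.Dict.empty []
  have hsnd := pv_loop_snd xs PySem.Dict.empty [] (by simp)
  simp only [hsnd, hfst, pv_keys_fold]
  rw [PySem.List.foldl_append_singleton_eq_map]
  simp [pv_getD_fold]
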